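-- pv_equiv track=rewrite | github.com/thumbe12856/competitive-programming | AA/L1/Gunjyo_and_dice/solve.py | solve
-- ===== SOURCE A (Python) =====
-- def solve(N):
--     ans = 0
--     for i in range(1, 101, 1):
--         for j in range(1, 101, 1):
--             for valid, k in [
--                 [True, N - i - j],                # a + b + c
--                 [True, N - i * j],                # a * b + c
--                 [not((N - i) % j), (N - i) // j], # a + b * c
--                 [not(N % (i * j)), N // (i * j)], # a * b * c
--             ]:
--                 if valid and 1 <= k <= 100:
--                     ans += 1
--     return ans
-- ===== SOURCE B (Python) =====
-- def solve(N):
--     # alternative: enumerate all dice triples (i, j, k) directly and test each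
--     # of the four expression forms independently, instead of deriving k arithmetically
--     ans = 0
--     for i in range(1, 101):
--         for j in range(1, 101):
--             for k in range(1, 101):
--                 if i + j + k == N:
--                     ans += 1
--                 if i * j + k == N:
--                     ans += 1
--                 if i + j * k == N:
--                     ans += 1
--                 if i * j * k == N:
--                     ans += 1
--     return ans
-- ===== Notes on version B (the rewrite author's own statement) =====
-- stated objective: alternative
-- what changed: B replaces A's per-pair arithmetic derivation of the third die value (computing k and checking divisibility/range for each equation form) with a direct brute-force enumeration of all triples (i,j,k) over the fixed dice range, testing the four equation forms independently.
import Mathlib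
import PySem

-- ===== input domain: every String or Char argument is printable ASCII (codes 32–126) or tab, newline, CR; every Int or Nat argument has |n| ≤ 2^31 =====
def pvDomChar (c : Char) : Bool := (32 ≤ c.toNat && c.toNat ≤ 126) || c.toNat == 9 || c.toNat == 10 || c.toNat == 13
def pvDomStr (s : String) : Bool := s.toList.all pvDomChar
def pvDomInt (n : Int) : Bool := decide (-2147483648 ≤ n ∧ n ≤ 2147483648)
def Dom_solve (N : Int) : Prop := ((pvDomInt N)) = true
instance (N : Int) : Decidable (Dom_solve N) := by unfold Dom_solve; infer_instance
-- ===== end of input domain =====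

-- B enumerates all triples (i,j,k) and tests the four expression forms independently,
-- instead of A's derivation of the third value by arithmetic; objective: alternative (B is not faster).


-- ===== PORT A =====
def solve (N : Int) : Int :=
  (PySem.List.pyRange 1 101 1).foldl (fun ans i =>
    (PySem.List.pyRange 1 101 1).foldl (fun ans j =>
      ([ (true, N - i - j),                                                  -- a + b + c
         (true, N - i * j),                                                  -- a * b + c
         (PySem.Int.mod (N - i) j == 0, PySem.Int.floordiv (N - i) j),       -- a + b * c
         (PySem.Int.mod N (i * j) == 0, PySem.Int.floordiv N (i * j))        -- a * b * c
       ] : List (Bool × Int)).foldl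
        (fun ans vk =>
          if vk.1 && decide (1 ≤ vk.2 ∧ vk.2 ≤ 100) then ans + 1 else ans)
        ans) ans) 0

-- ===== PORT B =====
def solve_alt (N : Int) : Int :=
  (PySem.List.pyRange 1 101 1).foldl (fun ans i =>
    (PySem.List.pyRange 1 101 1).foldl (fun ans j =>
      (PySem.List.pyRange 1 101 1).foldl (fun ans k =>
        let ans := if i + j + k = N then ans + 1 else ans
        let ans := if i * j + k = N then ans + 1 else ans
        let ans := if i + j * k = N then ans + 1 else ans
        if i * j * k = N then ans + 1 else ans) ans) ans) 0

-- ===== PRECONDITION & SPEC =====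
def Spec_solve (N : Int) (out : Int) : Prop := out = solve_alt N
instance (N : Int) (out : Int) : Decidable (Spec_solve N out) := by unfold Spec_solve; infer_instance

-- ===== CLAIM (what is proved, stated in full; the proofs are below) =====
def Claim_equal_solve : Prop := ∀ (N : Int), Dom_solve N → Spec_solve N (solve N)

-- ===== LEMMAS AND PROOFS =====

-- 0/1-sum over k ∈ 1..100 of an equation with a unique solution c
theorem sum_ind_eq (c : Int) :
    ((PySem.List.pyRange 1 101 1).map (fun k => if k = c then (1:Int) else 0)).sum
      = if 1 ≤ c ∧ c ≤ 100 then 1 else 0 := by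
  have h := PySem.List.sum_map_ite_one_zero (fun k : Int => k == c) (PySem.List.pyRange 1 101 1)
  simp only [beq_iff_eq] at h
  rw [h]
  have hcount : List.countP (fun k : Int => k == c) (PySem.List.pyRange 1 101 1)
      = List.count c (PySem.List.pyRange 1 101 1) := by
    simp [List.count, BEq.comm]
  rw [hcount]
  by_cases hc : 1 ≤ c ∧ c ≤ 100
  · rw [List.count_eq_one_of_mem (PySem.List.nodup_pyRange_one 1 101)
      (PySem.List.mem_pyRange_one.mpr ⟨hc.1, by omega⟩)]
    simp [hc]
  · rw [List.count_eq_zero.mpr (fun hm => hc (by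
      have := PySem.List.mem_pyRange_one.mp hm; omega))]
    simp [hc]

-- the multiplicative forms: sum over k ∈ 1..100 of [d*k + off = N], d > 0
theorem sum_ind_mul (d off N : Int) (hd : 0 < d) :
    ((PySem.List.pyRange 1 101 1).map (fun k => if d * k + off = N then (1:Int) else 0)).sum
      = if (PySem.Int.mod (N - off) d == 0)
            && decide (1 ≤ PySem.Int.floordiv (N - off) d ∧ PySem.Int.floordiv (N - off) d ≤ 100)
          then 1 else 0 := by
  by_cases hdvd : d ∣ (N - off)
  · have hmod : PySem.Int.mod (N - off) d = 0 := (PySem.Int.mod_eq_zero_iff_dvd _ _).mpr hdvd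
    have hfd : PySem.Int.floordiv (N - off) d = (N - off) / d :=
      PySem.Int.floordiv_eq_ediv_of_pos hd
    have heq : ∀ k : Int, (d * k + off = N) ↔ (k = (N - off) / d) := by
      intro k
      obtain ⟨q, hq⟩ := hdvd
      rw [hq]
      rw [Int.mul_ediv_cancel_left _ (by omega)]
      constructor
      · intro h
        have : d * k = d * q := by omega
        exact mul_left_cancel₀ (by omega) this
      · intro h; subst h; omega
    simp only [heq]
    rw [sum_ind_eq, hmod, hfd]
    simp
  · have hmod : PySem.Int.mod (N - off) d ≠ 0 := fun h =>
      hdvd ((PySem.Int.mod_eq_zero_iff_dvd _ _).mp h)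
    have hz : ∀ k : Int, ¬ (d * k + off = N) := by
      intro k hk
      exact hdvd ⟨k, by omega⟩
    simp only [hz, if_false]
    simp [hmod]

-- per-(i,j) inner loop equality
theorem inner_eq (N i j ans : Int) (hi : 1 ≤ i) (hj : 1 ≤ j) :
    ([ (true, N - i - j), (true, N - i * j),
       (PySem.Int.mod (N - i) j == 0, PySem.Int.floordiv (N - i) j),
       (PySem.Int.mod N (i * j) == 0, PySem.Int.floordiv N (i * j)) ] : List (Bool × Int)).foldl
      (fun ans vk => if vk.1 && decide (1 ≤ vk.2 ∧ vk.2 ≤ 100) then ans + 1 else ans) ans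
    = (PySem.List.pyRange 1 101 1).foldl (fun ans k =>
        let ans := if i + j + k = N then ans + 1 else ans
        let ans := if i * j + k = N then ans + 1 else ans
        let ans := if i + j * k = N then ans + 1 else ans
        if i * j * k = N then ans + 1 else ans) ans := by
  -- B side: turn the body into acc + (sum of four indicators), then split the sum
  have hbody : (fun (ans k : Int) =>
        let ans := if i + j + k = N then ans + 1 else ans
        let ans := if i * j + k = N then ans + 1 else ans
        let ans := if i + j * k = N then ans + 1 else ans
        if i * j * k = N then ans + 1 else ans)
      = (fun (ans k : Int) => ans +
          (((if i + j + k = N then (1:Int) else 0) + (if i * j + k = N then 1 else 0))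
           + ((if i + j * k = N then 1 else 0) + (if i * j * k = N then 1 else 0)))) := by
    funext a k
    simp only []
    split_ifs <;> ring
  rw [hbody, PySem.List.foldl_add]
  rw [PySem.List.sum_map_add_int, PySem.List.sum_map_add_int, PySem.List.sum_map_add_int]
  -- evaluate the four indicator sums
  have h1 : ((PySem.List.pyRange 1 101 1).map (fun k => if i + j + k = N then (1:Int) else 0)).sum
      = if 1 ≤ N - i - j ∧ N - i - j ≤ 100 then 1 else 0 := by
    have heq : ∀ k : Int, (i + j + k = N) ↔ (k = N - i - j) := by intro k; omega
    simp only [heq]; exact sum_ind_eq _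
  have h2 : ((PySem.List.pyRange 1 101 1).map (fun k => if i * j + k = N then (1:Int) else 0)).sum
      = if 1 ≤ N - i * j ∧ N - i * j ≤ 100 then 1 else 0 := by
    have heq : ∀ k : Int, (i * j + k = N) ↔ (k = N - i * j) := by
      intro k; constructor <;> intro h <;> omega
    simp only [heq]; exact sum_ind_eq _
  have h3 := sum_ind_mul j i N hj
  have h4 := sum_ind_mul (i * j) 0 N (by positivity)
  have h3' : ((PySem.List.pyRange 1 101 1).map (fun k => if i + j * k = N then (1:Int) else 0)).sum
      = if (PySem.Int.mod (N - i) j == 0)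
            && decide (1 ≤ PySem.Int.floordiv (N - i) j ∧ PySem.Int.floordiv (N - i) j ≤ 100)
          then 1 else 0 := by
    have heq : ∀ k : Int, (i + j * k = N) ↔ (j * k + i = N) := by intro k; constructor <;> intro h <;> omega
    simp only [heq]; exact h3
  have h4' : ((PySem.List.pyRange 1 101 1).map (fun k => if i * j * k = N then (1:Int) else 0)).sum
      = if (PySem.Int.mod N (i * j) == 0)
            && decide (1 ≤ PySem.Int.floordiv N (i * j) ∧ PySem.Int.floordiv N (i * j) ≤ 100)
          then 1 else 0 := by
    have heq : ∀ k : Int, (i * j * k = N) ↔ ((i * j) * k + 0 = N) := by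
      intro k; constructor <;> intro h <;> omega
    simp only [sub_zero] at h4
    simp only [heq]
    exact h4
  rw [h1, h2, h3', h4']
  -- A side: unfold the 4-element fold
  simp only [List.foldl_cons, List.foldl_nil, true_and, Bool.and_eq_true,
    decide_eq_true_eq, beq_iff_eq]
  split_ifs <;> ring

-- ===== VERDICT (by name: the statement is the Claim_ definition above) =====
theorem solve_spec : Claim_equal_solve := by
  intro N _
  unfold Spec_solve solve solve_alt
  apply PySem.List.foldl_congr_mem
  intro acc i hi
  apply PySem.List.foldl_congr_mem
  intro acc2 j hj
  have hi' := (PySem.List.mem_pyRange_one.mp hi).1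
  have hj' := (PySem.List.mem_pyRange_one.mp hj).1
  exact inner_eq N i j acc2 hi' hj'
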